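-- pv_equiv track=rewrite | github.com/q4x2/ilinom_tasks | ilinom_template.py | is_template_match
-- ===== SOURCE A (Python) =====
-- def is_template_match(input_str, templ_str):
--     len_input = len(input_str)
--     len_templ = len(templ_str)
--     if len_input < len_templ or len_templ == 0:
--         return False
--     list_templ = list(templ_str)
--     cnt = 0
--     for chr in input_str:
--         if chr in list_templ:
--             list_templ.remove(chr)
--             cnt += 1
--             if cnt == len_templ:
--                 return True
--         else:
--             list_templ = list(templ_str)
--             cnt = 0
--     return False
-- ===== SOURCE B (Python) =====
-- def is_template_match(input_str, templ_str):
--     n, m = len(input_str), len(templ_str)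
--     if m == 0 or n < m:
--         return False
--     need = {}
--     for c in templ_str:
--         need[c] = need.get(c, 0) + 1
--     # Pass 1: compute the greedy segment boundaries by counting the current
--     # window's characters upward and cutting where a count exceeds the template's.
--     starts = [0]
--     seen = {}
--     for j, c in enumerate(input_str):
--         seen[c] = seen.get(c, 0) + 1
--         if seen[c] > need.get(c, 0):
--             starts.append(j + 1)
--             seen = {}
--     # Pass 2: a match exists iff some segment consumed at least m characters.
--     for a, b in zip(starts, starts[1:]):
--         if b - 1 - a >= m:
--             return True
--     return n - starts[-1] >= m
-- ===== Notes on version B (the rewrite author's own statement) =====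
-- stated objective: faster
-- what changed: Instead of simulating the consume-and-reset scan with a mutable remaining-template list, B runs two staged passes: pass 1 counts window characters UPWARD against a precomputed template counter and records the list of greedy segment boundaries, pass 2 decides the answer purely arithmetically from consecutive boundary gaps (a segment of length >= len(templ) exists).
import Mathlib
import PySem

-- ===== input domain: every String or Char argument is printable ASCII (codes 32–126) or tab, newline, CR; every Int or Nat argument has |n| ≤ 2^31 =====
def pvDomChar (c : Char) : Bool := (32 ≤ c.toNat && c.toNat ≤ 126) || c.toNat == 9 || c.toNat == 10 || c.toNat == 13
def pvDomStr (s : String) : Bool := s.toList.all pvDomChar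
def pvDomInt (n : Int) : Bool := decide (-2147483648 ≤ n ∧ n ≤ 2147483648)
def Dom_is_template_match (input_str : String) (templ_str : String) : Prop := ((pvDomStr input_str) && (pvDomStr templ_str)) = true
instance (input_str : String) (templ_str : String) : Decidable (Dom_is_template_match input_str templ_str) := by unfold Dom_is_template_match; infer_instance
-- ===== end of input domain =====

-- B replaces A's consume-and-reset scan over a mutable remaining-template list by two staged
-- passes: boundary positions of the greedy segments first, then an arithmetic check on the gaps.

-- ===== PORT A =====
-- the for-loop of A with its early return; state = (list_templ, cnt)
def isTMA_loop (templ : List Char) (lenT : Int) : List Char → List Char → Int → Bool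
  | [], _, _ => false
  | c :: rest, lt, cnt =>
    if lt.contains c then
      let lt' := (PySem.List.remove? lt c).getD lt
      if cnt + 1 = lenT then true
      else isTMA_loop templ lenT rest lt' (cnt + 1)
    else isTMA_loop templ lenT rest templ 0

def is_template_match (input_str : String) (templ_str : String) : Bool :=
  let len_input : Int := input_str.toList.length
  let len_templ : Int := templ_str.toList.length
  if len_input < len_templ ∨ len_templ = 0 then false
  else isTMA_loop templ_str.toList len_templ input_str.toList templ_str.toList 0

-- ===== PORT B =====
-- pass 1 of B: for j, c in enumerate(input_str): count c upward, cut segment when over need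
def isTMB_scan (need : PySem.Dict Char Int) : List Char → Int → PySem.Dict Char Int → List Int → List Int
  | [], _, _, starts => starts
  | c :: rest, j, seen, starts =>
    let seen' := seen.insert c (seen.getD c 0 + 1)
    if need.getD c 0 < seen'.getD c 0 then
      isTMB_scan need rest (j + 1) PySem.Dict.empty (starts ++ [j + 1])
    else isTMB_scan need rest (j + 1) seen' starts

-- pass 2 of B: the zip loop over consecutive starts, then the last segment
def isTMB_check (m : Int) : List Int → Int → Bool
  | [], _ => false
  | [s], n => decide (m ≤ n - s)
  | a :: b :: rest, n => if m ≤ b - 1 - a then true else isTMB_check m (b :: rest) n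

def is_template_match_alt (input_str : String) (templ_str : String) : Bool :=
  let n : Int := input_str.toList.length
  let m : Int := templ_str.toList.length
  if m = 0 ∨ n < m then false
  else
    let need := templ_str.toList.foldl (fun d c => d.insert c (d.getD c 0 + 1)) PySem.Dict.empty
    isTMB_check m (isTMB_scan need input_str.toList 0 PySem.Dict.empty [0]) n

-- ===== PRECONDITION & SPEC =====
def Spec_is_template_match (input_str : String) (templ_str : String) (out : Bool) : Prop := out = is_template_match_alt input_str templ_str
instance (input_str : String) (templ_str : String) (out : Bool) : Decidable (Spec_is_template_match input_str templ_str out) := by unfold Spec_is_template_match; infer_instance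

-- ===== CLAIM (what is proved, stated in full; the proofs are below) =====
def Claim_equal_is_template_match : Prop := ∀ (input_str : String) (templ_str : String), Dom_is_template_match input_str templ_str → Spec_is_template_match input_str templ_str (is_template_match input_str templ_str)

-- ===== LEMMAS AND PROOFS =====

-- the scan only appends to its accumulator
theorem isTMB_scan_append (need : PySem.Dict Char Int) :
    ∀ (rest : List Char) (j : Int) (seen : PySem.Dict Char Int) (starts : List Int),
    isTMB_scan need rest j seen starts = starts ++ isTMB_scan need rest j seen [] := by
  intro rest
  induction rest with
  | nil => intro j seen starts; simp [isTMB_scan]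
  | cons c rest ih =>
    intro j seen starts
    rw [isTMB_scan, isTMB_scan]
    by_cases h : need.getD c 0 < (seen.insert c (seen.getD c 0 + 1)).getD c 0
    · rw [if_pos h, if_pos h, ih _ _ (starts ++ [j+1]), ih _ _ ([] ++ [j+1])]
      simp
    · rw [if_neg h, if_neg h]
      exact ih _ _ starts

theorem isTMB_check_cons2 (m a b : Int) (rest : List Int) (n : Int) :
    isTMB_check m (a :: b :: rest) n = if m ≤ b - 1 - a then true else isTMB_check m (b :: rest) n := rfl

-- once the current segment has already consumed m characters, the check is true
theorem isTMB_true (need : PySem.Dict Char Int) (m : Int) :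
    ∀ (rest : List Char) (j s n : Int) (seen : PySem.Dict Char Int),
    m ≤ j - s → n = j + rest.length →
    isTMB_check m (s :: isTMB_scan need rest j seen []) n = true := by
  intro rest
  induction rest with
  | nil =>
    intro j s n seen hms hn
    simp only [List.length_nil] at hn
    simp only [isTMB_scan, isTMB_check, decide_eq_true_eq]
    omega
  | cons c rest ih =>
    intro j s n seen hms hn
    rw [isTMB_scan]
    by_cases h : need.getD c 0 < (seen.insert c (seen.getD c 0 + 1)).getD c 0
    · rw [if_pos h, isTMB_scan_append]
      simp only [List.nil_append, List.singleton_append]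
      rw [isTMB_check_cons2, if_pos (by omega)]
    · rw [if_neg h]
      exact ih (j+1) s n _ (by omega) (by simp at hn ⊢; omega)

-- the main simulation: A's loop state (lt, cnt) against B's scan state (seen, current start s)
theorem isTM_main (templ : List Char) (htne : templ ≠ []) (need : PySem.Dict Char Int)
    (hbase : ∀ c, need.getD c 0 = (templ.count c : Int)) :
    ∀ (rest : List Char) (lt : List Char) (cnt j s n : Int) (seen : PySem.Dict Char Int),
    (∀ c, seen.getD c 0 = (templ.count c : Int) - (lt.count c : Int)) →
    (∀ c, lt.count c ≤ templ.count c) →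
    lt ≠ [] →
    cnt = (templ.length : Int) - (lt.length : Int) →
    j - s = cnt →
    n = j + rest.length →
    isTMA_loop templ (templ.length : Int) rest lt cnt
      = isTMB_check (templ.length : Int) (s :: isTMB_scan need rest j seen []) n := by
  intro rest
  induction rest with
  | nil =>
    intro lt cnt j s n seen _ _ hne hcnt hjs hn
    have hlen : 1 ≤ lt.length := List.length_pos_iff.mpr hne
    simp only [List.length_nil] at hn
    simp only [isTMA_loop, isTMB_scan, isTMB_check]
    symm
    simp only [decide_eq_false_iff_not]
    omega
  | cons c rest ih =>
    intro lt cnt j s n seen hseen hsub hne hcnt hjs hn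
    have hlen : 1 ≤ lt.length := List.length_pos_iff.mpr hne
    have hn' : n = (j + 1) + rest.length := by simp at hn ⊢; omega
    have hseenc : (seen.insert c (seen.getD c 0 + 1)).getD c 0 = seen.getD c 0 + 1 := by
      rw [PySem.Dict.getD_insert, if_pos rfl]
    rw [isTMA_loop, isTMB_scan]
    by_cases hc : c ∈ lt
    · have hcount : 1 ≤ lt.count c := List.count_pos_iff.mpr hc
      have hB : ¬ (need.getD c 0 < (seen.insert c (seen.getD c 0 + 1)).getD c 0) := by
        rw [hseenc, hseen, hbase]
        have := hsub c
        omega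
      rw [if_pos (by simpa using hc), if_neg hB]
      by_cases hdone : cnt + 1 = (templ.length : Int)
      · rw [if_pos hdone]
        have hlt1 : (lt.length : Int) = 1 := by omega
        exact (isTMB_true need _ rest (j+1) s n _ (by omega) hn').symm
      · rw [if_neg hdone]
        have herase : (PySem.List.remove? lt c).getD lt = lt.erase c := by
          rw [PySem.List.remove?_eq_some_erase lt c hc]; rfl
        rw [herase]
        have hlt2 : 2 ≤ lt.length := by omega
        have hel : (lt.erase c).length = lt.length - 1 := List.length_erase_of_mem hc
        apply ih (lt.erase c) (cnt + 1) (j + 1) s n _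
        · intro d
          rw [PySem.Dict.getD_insert]
          by_cases hd : d = c
          · subst hd
            rw [if_pos rfl, hseen, List.count_erase_self]
            push_cast [Nat.cast_sub hcount]
            ring
          · rw [if_neg hd, hseen, List.count_erase_of_ne hd]
        · intro d
          exact le_trans ((List.erase_sublist ..).count_le d) (hsub d)
        · intro h
          rw [← List.length_eq_zero_iff] at h
          omega
        · push_cast [hel, Nat.cast_sub (by omega : 1 ≤ lt.length)] at hcnt ⊢
          omega
        · omega
        · exact hn'
    · have hcount : lt.count c = 0 := List.count_eq_zero.mpr hc
      have hB : need.getD c 0 < (seen.insert c (seen.getD c 0 + 1)).getD c 0 := by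
        rw [hseenc, hseen, hbase, hcount]
        omega
      rw [if_neg (by simpa using hc), if_pos hB, isTMB_scan_append]
      simp only [List.nil_append, List.singleton_append]
      rw [isTMB_check_cons2]
      rw [if_neg (by omega)]
      apply ih templ 0 (j+1) (j+1) n PySem.Dict.empty
      · intro d; simp [PySem.Dict.getD_empty]
      · intro d; exact le_refl _
      · exact htne
      · simp
      · omega
      · exact hn'

theorem base_counts (templ : List Char) (c : Char) :
    (templ.foldl (fun d c => d.insert c (d.getD c 0 + 1)) PySem.Dict.empty).getD c 0 = (templ.count c : Int) := by
  rw [PySem.Dict.foldl_insert_getD_add_one_eq_counter, PySem.Dict.getD_counter]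

-- ===== VERDICT (by name: the statement is the Claim_ definition above) =====
theorem is_template_match_spec : Claim_equal_is_template_match := by
  intro input_str templ_str _
  unfold Spec_is_template_match is_template_match is_template_match_alt
  by_cases hguard : (input_str.toList.length : Int) < (templ_str.toList.length : Int) ∨ (templ_str.toList.length : Int) = 0
  · rw [if_pos hguard, if_pos (by omega)]
  · rw [if_neg hguard, if_neg (by omega)]
    have hne : templ_str.toList ≠ [] := by
      intro h
      exact hguard (Or.inr (by simp [h]))
    dsimp only
    rw [isTMB_scan_append]
    exact isTM_main templ_str.toList hne _ (base_counts templ_str.toList)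
      input_str.toList templ_str.toList 0 0 0 (input_str.toList.length : Int) PySem.Dict.empty
      (by intro d; simp [PySem.Dict.getD_empty]) (by intro d; exact le_refl _) hne
      (by omega) (by omega) (by omega)
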